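-- pv_equiv track=rewrite | github.com/VijaySaiBorru/TripCraft | evaluation/commonsense_constraint_no_quote.py | is_valid_city_sequence
-- ===== SOURCE A (Python) =====
-- def is_valid_city_sequence(city_list):
--     """
--     Validates city visit order for multi-day trips.
--
--     Rules:
--     - Each city must appear in one contiguous block.
--     - The origin city (first city) is allowed to reappear only as the final city.
--     - No other city may reappear after its block ends.
--     """
--
--     if len(city_list) < 2:
--         return False
--
--     origin = city_list[0]
--     visited = set()
--     prev_city = None
--
--     for idx, city in enumerate(city_list):
--         if city != prev_city:
--             # Re-entering a city after leaving it
--             if city in visited: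
--                 # Only allow origin at the very end (closed loop)
--                 if city == origin and idx == len(city_list) - 1:
--                     return True
--                 return False
--
--             visited.add(city)
--             prev_city = city
--
--     return True
-- ===== SOURCE B (Python) =====
-- def is_valid_city_sequence(city_list):
--     if len(city_list) < 2:
--         return False
--     # run-length-compress into blocks of (city, run_length)
--     blocks = []
--     for c in city_list:
--         if blocks and blocks[-1][0] == c:
--             blocks[-1] = (c, blocks[-1][1] + 1)
--         else:
--             blocks.append((c, 1))
--     origin = city_list[0]
--     seen = set()
--     for i, (c, k) in enumerate(blocks):
--         if c in seen:
--             # closed loop: origin may come back only as a single final element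
--             return c == origin and i == len(blocks) - 1 and k == 1
--         seen.add(c)
--     return True
-- ===== Notes on version B (the rewrite author's own statement) =====
-- stated objective: alternative
-- what changed: B first run-length-compresses the list into (city, run_length) blocks and then scans the blocks with a seen-set, deciding the closed-loop case by 'repeated block is the last block and has length 1' instead of A's elementwise scan with prev-city tracking and an element-index test.
import Mathlib
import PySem

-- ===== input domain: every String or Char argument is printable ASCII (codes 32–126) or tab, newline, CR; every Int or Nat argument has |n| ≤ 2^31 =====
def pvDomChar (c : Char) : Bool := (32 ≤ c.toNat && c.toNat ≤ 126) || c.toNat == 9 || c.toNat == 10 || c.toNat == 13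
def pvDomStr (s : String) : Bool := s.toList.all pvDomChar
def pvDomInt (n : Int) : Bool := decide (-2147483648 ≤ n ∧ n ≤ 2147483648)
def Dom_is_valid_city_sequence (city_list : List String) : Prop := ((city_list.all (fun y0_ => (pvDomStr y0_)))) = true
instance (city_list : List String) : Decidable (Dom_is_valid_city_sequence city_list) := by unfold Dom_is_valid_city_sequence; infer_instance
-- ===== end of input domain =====

-- B replaces A's elementwise prev-tracking scan by run-length compression into blocks followed by a block scan (objective: alternative decomposition, same cost).

-- ===== PORT A =====
-- A's for-loop over enumerate(city_list): state = (visited, prev_city), idx carried explicitly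
def isvGoA (origin : String) (n : Nat) : List String → Nat → PySem.Set String → Option String → Bool
  | [], _, _, _ => true
  | city :: rest, idx, visited, prev =>
    if some city ≠ prev then
      if PySem.Set.contains visited city then
        decide (city = origin ∧ idx = n - 1)
      else isvGoA origin n rest (idx + 1) (PySem.Set.add visited city) (some city)
    else isvGoA origin n rest (idx + 1) visited prev

def is_valid_city_sequence (city_list : List String) : Bool :=
  if city_list.length < 2 then false
  else isvGoA (city_list.headD "") city_list.length city_list 0 PySem.Set.empty none

-- ===== PORT B =====
-- Source B's append-to-last block builder, transliterated with a reverse accumulator (cons = append, head = blocks[-1]), reversed at the end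
def isvStep (acc : List (String × Nat)) (c : String) : List (String × Nat) :=
  match acc with
  | (c', k) :: t => if c' = c then (c, k + 1) :: t else (c, 1) :: (c', k) :: t
  | [] => [(c, 1)]

def isvBlocksRev (city_list : List String) : List (String × Nat) :=
  city_list.foldl isvStep []

-- Source B's for-loop over enumerate(blocks): state = seen, block index i carried explicitly
def isvGoB (origin : String) (m : Nat) : List (String × Nat) → Nat → PySem.Set String → Bool
  | [], _, _ => true
  | (c, k) :: rest, i, seen =>
    if PySem.Set.contains seen c then
      decide (c = origin ∧ i = m - 1 ∧ k = 1)
    else isvGoB origin m rest (i + 1) (PySem.Set.add seen c)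

def is_valid_city_sequence_alt (city_list : List String) : Bool :=
  if city_list.length < 2 then false
  else
    let blocks := (isvBlocksRev city_list).reverse
    isvGoB (city_list.headD "") blocks.length blocks 0 PySem.Set.empty

-- ===== PRECONDITION & SPEC =====
def Spec_is_valid_city_sequence (city_list : List String) (out : Bool) : Prop := out = is_valid_city_sequence_alt city_list
instance (city_list : List String) (out : Bool) : Decidable (Spec_is_valid_city_sequence city_list out) := by unfold Spec_is_valid_city_sequence; infer_instance

-- ===== CLAIM (what is proved, stated in full; the proofs are below) =====
def Claim_equal_is_valid_city_sequence : Prop := ∀ (city_list : List String), Dom_is_valid_city_sequence city_list → Spec_is_valid_city_sequence city_list (is_valid_city_sequence city_list)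

-- ===== LEMMAS AND PROOFS =====

/-- Expansion of a block list back into the city list. -/
def isvFlat (bs : List (String × Nat)) : List String :=
  bs.flatMap (fun p => List.replicate p.2 p.1)

theorem isvFlat_cons (p : String × Nat) (t : List (String × Nat)) :
    isvFlat (p :: t) = List.replicate p.2 p.1 ++ isvFlat t := rfl

/-- Blocks are well-formed: positive run lengths, adjacent cities distinct. -/
def isvWF (bs : List (String × Nat)) : Prop :=
  (∀ p ∈ bs, 1 ≤ p.2) ∧ bs.IsChain (fun p q => p.1 ≠ q.1)

theorem isvBlocksRev_spec (city_list : List String) :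
    ∀ acc : List (String × Nat), isvWF acc →
      isvWF (city_list.foldl isvStep acc)
      ∧ isvFlat (city_list.foldl isvStep acc).reverse = isvFlat acc.reverse ++ city_list := by
  induction city_list with
  | nil => intro acc h; simpa using h
  | cons c rest ih =>
    intro acc h
    obtain ⟨hpos, hchain⟩ := h
    simp only [List.foldl_cons]
    cases acc with
    | nil =>
      have := ih [(c, 1)] ⟨by simp, List.isChain_singleton _⟩
      refine ⟨this.1, ?_⟩
      rw [show isvStep [] c = [(c, 1)] from rfl, this.2]; simp [isvFlat]
    | cons hd t =>
      obtain ⟨c', k⟩ := hd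
      by_cases hc : c' = c
      · subst hc
        rw [show isvStep ((c', k) :: t) c' = (c', k + 1) :: t by simp [isvStep]]
        have hwf : isvWF ((c', k + 1) :: t) := by
          refine ⟨?_, ?_⟩
          · intro p hp
            rcases List.mem_cons.mp hp with h' | h'
            · subst h'; omega
            · exact hpos p (List.mem_cons_of_mem _ h')
          · cases t with
            | nil => exact List.isChain_singleton _
            | cons q t' =>
              rcases List.isChain_cons_cons.mp hchain with ⟨h1, h2⟩
              exact List.isChain_cons_cons.mpr ⟨h1, h2⟩
        have := ih _ hwf
        refine ⟨this.1, ?_⟩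
        rw [this.2]
        simp [isvFlat, List.replicate_succ' (n := k)]
      · rw [show isvStep ((c', k) :: t) c = (c, 1) :: (c', k) :: t by simp [isvStep, hc]]
        have hwf : isvWF ((c, 1) :: (c', k) :: t) := by
          refine ⟨?_, ?_⟩
          · intro p hp
            rcases List.mem_cons.mp hp with h' | h'
            · subst h'; omega
            · exact hpos p h'
          · exact List.isChain_cons_cons.mpr ⟨fun h => hc h.symm, hchain⟩
        have := ih _ hwf
        refine ⟨this.1, ?_⟩
        rw [this.2]
        simp [isvFlat]

/-- Within a block, A skips the elements equal to prev. -/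
theorem isvGoA_skip (origin c : String) (n : Nat) :
    ∀ (j : Nat) (rest : List String) (idx : Nat) (visited : PySem.Set String),
      isvGoA origin n (List.replicate j c ++ rest) idx visited (some c)
        = isvGoA origin n rest (idx + j) visited (some c) := by
  intro j
  induction j with
  | zero => intro rest idx visited; simp
  | succ j ih =>
    intro rest idx visited
    rw [List.replicate_succ, List.cons_append]
    simp only [isvGoA]
    rw [if_neg (by simp), ih]
    have h : idx + 1 + j = idx + (j + 1) := by omega
    rw [h]

theorem isvFlat_length_pos (p : String × Nat) (bs : List (String × Nat))
    (h : ∀ q ∈ p :: bs, 1 ≤ q.2) : 1 ≤ (isvFlat (p :: bs)).length := by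
  have := h p List.mem_cons_self
  rw [isvFlat_cons, List.length_append, List.length_replicate]
  omega

/-- Main correspondence: A's elementwise loop over the flattened blocks equals
    B's block loop, for well-formed blocks whose first city differs from prev. -/
theorem isvGo_main (origin : String) :
    ∀ (bs : List (String × Nat)) (idx i : Nat) (seen : PySem.Set String) (prev : Option String),
      isvWF bs →
      (∀ c k t, bs = (c, k) :: t → prev ≠ some c) →
      isvGoA origin (idx + (isvFlat bs).length) (isvFlat bs) idx seen prev
        = isvGoB origin (i + bs.length) bs i seen := by
  intro bs
  induction bs with
  | nil => intro idx i seen prev _ _; simp [isvFlat, isvGoA, isvGoB]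
  | cons hd t ih =>
    intro idx i seen prev hwf hprev
    obtain ⟨c, k⟩ := hd
    obtain ⟨hpos, hchain⟩ := hwf
    have hk1 : 1 ≤ k := hpos (c, k) List.mem_cons_self
    have hne : (some c : Option String) ≠ prev := (hprev c k t rfl).symm
    have hflat : isvFlat ((c, k) :: t) = c :: (List.replicate (k - 1) c ++ isvFlat t) := by
      rw [isvFlat_cons]
      have h : k = (k - 1) + 1 := by omega
      rw [h, List.replicate_succ]
      simp
    rw [hflat]
    simp only [isvGoA, isvGoB]
    rw [if_pos hne]
    by_cases hmem : PySem.Set.contains seen c = true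
    · rw [if_pos hmem, if_pos hmem, decide_eq_decide]
      cases t with
      | nil =>
        simp only [isvFlat, List.flatMap_nil, List.append_nil, List.length_cons,
          List.length_replicate, List.length_nil]
        constructor
        · rintro ⟨h1, h2⟩; exact ⟨h1, by omega, by omega⟩
        · rintro ⟨h1, h2, h3⟩; exact ⟨h1, by omega⟩
      | cons q t' =>
        have hq : 1 ≤ (isvFlat (q :: t')).length :=
          isvFlat_length_pos q t' (fun r hr => hpos r (List.mem_cons_of_mem _ hr))
        simp only [List.length_cons, List.length_append, List.length_replicate]
        constructor
        · rintro ⟨h1, h2⟩; exfalso; omega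
        · rintro ⟨h1, h2, h3⟩; exfalso; omega
    · rw [if_neg hmem, if_neg hmem, isvGoA_skip]
      have hwft : isvWF t := ⟨fun p hp => hpos p (List.mem_cons_of_mem _ hp), hchain.of_cons⟩
    -- next block's city differs from c by the chain condition
      have hprev' : ∀ c' k' t', t = (c', k') :: t' → (some c : Option String) ≠ some c' := by
        intro c' k' t' ht h
        rw [ht] at hchain
        exact (List.isChain_cons_cons.mp hchain).1 (by simpa using h)
      have hrec := ih (idx + 1 + (k - 1)) (i + 1) (PySem.Set.add seen c) (some c) hwft hprev'
      have hn : idx + (c :: (List.replicate (k - 1) c ++ isvFlat t)).length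
          = (idx + 1 + (k - 1)) + (isvFlat t).length := by
        simp only [List.length_cons, List.length_append, List.length_replicate]; omega
      have hm : i + ((c, k) :: t).length = (i + 1) + t.length := by
        simp only [List.length_cons]; omega
      rw [hn, hm]
      exact hrec

-- ===== VERDICT (by name: the statement is the Claim_ definition above) =====
theorem is_valid_city_sequence_spec : Claim_equal_is_valid_city_sequence := by
  intro city_list _
  unfold Spec_is_valid_city_sequence is_valid_city_sequence is_valid_city_sequence_alt
  by_cases hlen : city_list.length < 2
  · simp [hlen]
  · simp only [if_neg hlen]
    have hspec := isvBlocksRev_spec city_list [] ⟨by simp, List.isChain_nil⟩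
    have hwf : isvWF (isvBlocksRev city_list).reverse := by
      obtain ⟨⟨h1, h2⟩, _⟩ := hspec
      exact ⟨fun p hp => h1 p (List.mem_reverse.mp hp),
        List.isChain_reverse.mpr (h2.imp (fun {p q} h => Ne.symm h))⟩
    have hflat : isvFlat (isvBlocksRev city_list).reverse = city_list := by
      have h := hspec.2
      simpa [isvFlat, isvBlocksRev] using h
    have hmain := isvGo_main (city_list.headD "") (isvBlocksRev city_list).reverse 0 0
      PySem.Set.empty none hwf (fun _ _ _ _ h => by cases h)
    rw [hflat] at hmain
    simpa using hmain
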